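-- pv_equiv track=rewrite | github.com/adzai/adventofcode | 2024/day5/solution.py | get_instructions_and_pages
-- ===== SOURCE A (Python) =====
-- def get_instructions_and_pages(input):
--     collecting_instructions = True
--     instructions, pages = [], []
--     for line in input:
--         if line == "":
--             collecting_instructions = False
--             continue
--
--         if collecting_instructions:
--             instructions.append(line)
--         else:
--             pages.append(line)
--
--     return instructions, pages
-- ===== SOURCE B (Python) =====
-- def get_instructions_and_pages(input):
--     lines = list(input)
--     if "" in lines:
--         i = lines.index("")
--         return lines[:i], [l for l in lines[i + 1:] if l != ""]
--     return lines, []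
-- ===== Notes on version B (the rewrite author's own statement) =====
-- stated objective: simpler
-- what changed: Replaces the boolean-flag single-pass accumulation with finding the first blank line's index and returning slices: the prefix as instructions and the blank-filtered suffix as pages.
import Mathlib
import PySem

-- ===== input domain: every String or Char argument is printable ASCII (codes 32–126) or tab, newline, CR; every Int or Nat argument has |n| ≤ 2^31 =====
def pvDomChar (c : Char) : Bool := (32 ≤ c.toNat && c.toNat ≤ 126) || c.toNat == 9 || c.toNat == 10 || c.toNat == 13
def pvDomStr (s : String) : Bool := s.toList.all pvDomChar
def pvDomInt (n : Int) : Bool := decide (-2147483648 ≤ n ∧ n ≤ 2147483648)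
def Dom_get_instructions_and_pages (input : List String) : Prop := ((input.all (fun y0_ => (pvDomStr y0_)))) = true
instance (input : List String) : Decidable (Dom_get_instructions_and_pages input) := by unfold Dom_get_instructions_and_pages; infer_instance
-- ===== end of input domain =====

-- B replaces A's boolean-flag single pass by locating the first blank line and slicing; objective: simpler.

-- ===== PORT A =====
-- loop state: (collecting_instructions, instructions, pages)
def get_instructions_and_pages (input : List String) : List String × List String :=
  let st := input.foldl (fun (s : Bool × List String × List String) line =>
    if line == "" then (false, s.2.1, s.2.2)
    else if s.1 then (s.1, s.2.1 ++ [line], s.2.2)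
    else (s.1, s.2.1, s.2.2 ++ [line])) (true, [], [])
  (st.2.1, st.2.2)

-- ===== PORT B =====
def get_instructions_and_pages_alt (input : List String) : List String × List String :=
  match PySem.List.index? input "" with
  | some i =>
      (PySem.List.slice input none (some (i : Int)),
       (PySem.List.slice input (some ((i : Int) + 1)) none).filter (fun l => l != ""))
  | none => (input, [])

-- ===== PRECONDITION & SPEC =====
def Spec_get_instructions_and_pages (input : List String) (out : List String × List String) : Prop := out = get_instructions_and_pages_alt input
instance (input : List String) (out : List String × List String) : Decidable (Spec_get_instructions_and_pages input out) := by unfold Spec_get_instructions_and_pages; infer_instance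

-- ===== CLAIM (what is proved, stated in full; the proofs are below) =====
def Claim_equal_get_instructions_and_pages : Prop := ∀ (input : List String), Dom_get_instructions_and_pages input → Spec_get_instructions_and_pages input (get_instructions_and_pages input)

-- ===== LEMMAS AND PROOFS =====

def pvStep (s : Bool × List String × List String) (line : String) : Bool × List String × List String :=
  if line == "" then (false, s.2.1, s.2.2)
  else if s.1 then (s.1, s.2.1 ++ [line], s.2.2)
  else (s.1, s.2.1, s.2.2 ++ [line])

lemma pvLoopFalse (rest : List String) : ∀ ins pgs : List String,
    rest.foldl pvStep (false, ins, pgs) = (false, ins, pgs ++ rest.filter (fun l => l != "")) := by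
  induction rest with
  | nil => simp
  | cons x rest ih =>
    intro ins pgs
    by_cases hx : x = ""
    · simp [hx, pvStep, ih]
    · simp [List.foldl_cons, pvStep, hx, ih]

lemma pvLoopTrue (rest : List String) : ∀ ins pgs : List String,
    rest.foldl pvStep (true, ins, pgs) =
      match PySem.List.index? rest "" with
      | some i => (false, ins ++ rest.take i, pgs ++ ((rest.drop (i + 1)).filter (fun l => l != "")))
      | none => (true, ins ++ rest, pgs) := by
  induction rest with
  | nil => simp [PySem.List.index?]
  | cons x rest ih =>
    intro ins pgs
    by_cases hx : x = ""
    · subst hx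
      rw [PySem.List.index?_cons_self]
      simp [List.foldl_cons, pvStep, pvLoopFalse]
    · rw [PySem.List.index?_cons_of_ne rest hx]
      have hstep : pvStep (true, ins, pgs) x = (true, ins ++ [x], pgs) := by
        simp [pvStep, hx]
      rw [List.foldl_cons, hstep, ih]
      cases h : PySem.List.index? rest "" with
      | none => simp
      | some i => simp [List.take_succ_cons, List.drop_succ_cons]

lemma pvMain (input : List String) :
    get_instructions_and_pages input = get_instructions_and_pages_alt input := by
  show (let st := input.foldl pvStep (true, [], []); (st.2.1, st.2.2)) = _
  rw [pvLoopTrue input [] []]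
  unfold get_instructions_and_pages_alt
  cases h : PySem.List.index? input "" with
  | none => simp
  | some i =>
    simp only [List.nil_append]
    rw [PySem.List.slice_to_natCast]
    have : ((i : Int) + 1) = ((i + 1 : Nat) : Int) := by push_cast; ring
    rw [this, PySem.List.slice_from_natCast]

-- ===== VERDICT (by name: the statement is the Claim_ definition above) =====
theorem get_instructions_and_pages_spec : Claim_equal_get_instructions_and_pages := by
  intro input _
  exact pvMain input
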